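-- pv_equiv track=rewrite | github.com/EduLMoraes/Damas | qlearning.py | is_combo
-- ===== SOURCE A (Python) =====
-- def is_combo(board, position, name):
--         if position == [None, None]:
--             return False
--
--         x = position[0]
--         y = position[1]
--
--         for i in range(max(1, x - 1), min(8, x + 2)):
--             for j in range(max(1, y - 1), min(8, y + 2)):
--                 if (i + j) % 2 == 0:
--                     if board[i][j] == name:
--                         if not (i+1 > 7 or i-1 < 0 or j+1 > 7 or j-1 < 0):
--
--                             if i > x and j > y:
--                                 if board[i + 1][j + 1] == "none":
--                                     return True
--
--                             elif i > x and j < y: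
--                                 if board[i + 1][j - 1] == "none":
--                                     return True
--
--                             elif i < x and j > y:
--                                 if board[i - 1][j + 1] == "none":
--                                     return True
--
--                             elif i < x and j < y:
--                                 if board[i - 1][j - 1] == "none":
--                                     return True
--
--         return False
-- ===== SOURCE B (Python) =====
-- def is_combo(board, position, name):
--     if position == [None, None]:
--         return False
--     x = position[0]
--     y = position[1]
--     for dx, dy in ((1, 1), (1, -1), (-1, 1), (-1, -1)):
--         i = x + dx
--         j = y + dy
--         if 1 <= i <= 6 and 1 <= j <= 6 and (i + j) % 2 == 0:
--             if board[i][j] == name and board[i + dx][j + dy] == "none":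
--                 return True
--     return False
-- ===== Notes on version B (the rewrite author's own statement) =====
-- stated objective: simpler
-- what changed: Instead of scanning the 3x3 window around (x,y) with nested ranges and a four-way direction classification, B iterates directly over the four diagonal offsets, checks bounds/parity once, and tests piece and landing square per offset.
-- outside the precondition, e.g. on is_combo([], [9, None], 'a'): A returns False, B raises TypeError
import Mathlib
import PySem

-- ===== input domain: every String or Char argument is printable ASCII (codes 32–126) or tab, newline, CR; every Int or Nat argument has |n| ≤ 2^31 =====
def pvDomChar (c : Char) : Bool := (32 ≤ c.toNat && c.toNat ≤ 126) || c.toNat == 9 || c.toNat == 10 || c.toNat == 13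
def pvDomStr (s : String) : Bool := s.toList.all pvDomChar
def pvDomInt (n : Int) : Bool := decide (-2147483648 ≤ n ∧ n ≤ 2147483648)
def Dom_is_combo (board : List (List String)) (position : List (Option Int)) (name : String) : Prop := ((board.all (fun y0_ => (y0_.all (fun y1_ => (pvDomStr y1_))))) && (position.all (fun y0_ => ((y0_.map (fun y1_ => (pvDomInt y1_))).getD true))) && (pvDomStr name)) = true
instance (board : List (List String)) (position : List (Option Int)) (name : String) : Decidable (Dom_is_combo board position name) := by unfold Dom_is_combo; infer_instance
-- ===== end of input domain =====

-- B replaces A's 3x3 window scan + four-way direction classification by a direct loop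
-- over the four diagonal offsets (objective: simpler); return values proved equal on Pre_.

-- board[i][j], exact for in-range indices (Pre_ guarantees the indices either side reads are in range)
def pvCell (board : List (List String)) (i j : Int) : String :=
  PySem.List.pyGetD (PySem.List.pyGetD board i []) j ""

-- ===== PORT A =====
def is_combo (board : List (List String)) (position : List (Option Int)) (name : String) : Bool :=
  if position = [none, none] then false
  else
    let x := (PySem.List.pyGetD position 0 none).getD 0
    let y := (PySem.List.pyGetD position 1 none).getD 0
    (PySem.List.pyRange (max 1 (x - 1)) (min 8 (x + 2)) 1).any (fun i =>
      (PySem.List.pyRange (max 1 (y - 1)) (min 8 (y + 2)) 1).any (fun j =>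
        (PySem.Int.mod (i + j) 2 == 0) &&
        (pvCell board i j == name) &&
        decide (¬ (i + 1 > 7 ∨ i - 1 < 0 ∨ j + 1 > 7 ∨ j - 1 < 0)) &&
        (if decide (i > x) && decide (j > y) then pvCell board (i + 1) (j + 1) == "none"
         else if decide (i > x) && decide (j < y) then pvCell board (i + 1) (j - 1) == "none"
         else if decide (i < x) && decide (j > y) then pvCell board (i - 1) (j + 1) == "none"
         else if decide (i < x) && decide (j < y) then pvCell board (i - 1) (j - 1) == "none"
         else false)))

-- ===== PORT B =====
def is_combo_alt (board : List (List String)) (position : List (Option Int)) (name : String) : Bool :=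
  if position = [none, none] then false
  else
    let x := (PySem.List.pyGetD position 0 none).getD 0
    let y := (PySem.List.pyGetD position 1 none).getD 0
    [((1 : Int), (1 : Int)), (1, -1), (-1, 1), (-1, -1)].any (fun d =>
      let i := x + d.1
      let j := y + d.2
      decide (1 ≤ i) && decide (i ≤ 6) && decide (1 ≤ j) && decide (j ≤ 6) &&
      (PySem.Int.mod (i + j) 2 == 0) &&
      (pvCell board i j == name) &&
      (pvCell board (i + d.1) (j + d.2) == "none"))

-- ===== PRECONDITION & SPEC =====
-- Pre_ excludes the inputs on which A raises (malformed positions, boards too small for the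
-- window scan); it also excludes two kinds of inputs A accidentally returns on: positions whose
-- second entry is None while the first is off-board (A returns False only because its outer range
-- is empty; B raises there), and boards smaller than 8x8 near which A happens not to index out of
-- range only because of their contents.
def pvPre (board : List (List String)) (position : List (Option Int)) : Bool :=
  match position with
  | [none, none] => true
  | _ =>
    match PySem.List.pyGetD position 0 none, PySem.List.pyGetD position 1 none with
    | some x, some y =>
        !(decide (0 ≤ x) && decide (x ≤ 8) && decide (0 ≤ y) && decide (y ≤ 8)) ||
        (decide (8 ≤ board.length) && (board.take 8).all (fun row => decide (8 ≤ row.length)))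
    | _, _ => false

def Pre_is_combo (board : List (List String)) (position : List (Option Int)) (name : String) : Prop :=
  pvPre board position = true
instance (board : List (List String)) (position : List (Option Int)) (name : String) : Decidable (Pre_is_combo board position name) := by unfold Pre_is_combo; infer_instance

def pvWitness_is_combo : List (List String) × List (Option Int) × String :=
  (List.replicate 8 (List.replicate 8 "none"), [some 2, some 2], "w")

def Spec_is_combo (board : List (List String)) (position : List (Option Int)) (name : String) (out : Bool) : Prop := out = is_combo_alt board position name
instance (board : List (List String)) (position : List (Option Int)) (name : String) (out : Bool) : Decidable (Spec_is_combo board position name out) := by unfold Spec_is_combo; infer_instance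

-- ===== CLAIM (what is proved, stated in full; the proofs are below) =====
def Claim_equal_is_combo : Prop := ∀ (board : List (List String)) (position : List (Option Int)) (name : String), Dom_is_combo board position name → Pre_is_combo board position name → Spec_is_combo board position name (is_combo board position name)

-- ===== LEMMAS AND PROOFS =====

theorem loops_eq (board : List (List String)) (name : String) (x y : Int) :
    (PySem.List.pyRange (max 1 (x - 1)) (min 8 (x + 2)) 1).any (fun i =>
      (PySem.List.pyRange (max 1 (y - 1)) (min 8 (y + 2)) 1).any (fun j =>
        (PySem.Int.mod (i + j) 2 == 0) &&
        (pvCell board i j == name) &&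
        decide (¬ (i + 1 > 7 ∨ i - 1 < 0 ∨ j + 1 > 7 ∨ j - 1 < 0)) &&
        (if decide (i > x) && decide (j > y) then pvCell board (i + 1) (j + 1) == "none"
         else if decide (i > x) && decide (j < y) then pvCell board (i + 1) (j - 1) == "none"
         else if decide (i < x) && decide (j > y) then pvCell board (i - 1) (j + 1) == "none"
         else if decide (i < x) && decide (j < y) then pvCell board (i - 1) (j - 1) == "none"
         else false))) =
    [((1 : Int), (1 : Int)), (1, -1), (-1, 1), (-1, -1)].any (fun d =>
      let i := x + d.1
      let j := y + d.2
      decide (1 ≤ i) && decide (i ≤ 6) && decide (1 ≤ j) && decide (j ≤ 6) &&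
      (PySem.Int.mod (i + j) 2 == 0) &&
      (pvCell board i j == name) &&
      (pvCell board (i + d.1) (j + d.2) == "none")) := by
  rw [Bool.eq_iff_iff, List.any_eq_true, List.any_eq_true]
  constructor
  · rintro ⟨i, hi, hA⟩
    rw [List.any_eq_true] at hA
    obtain ⟨j, hj, hbody⟩ := hA
    rw [PySem.List.mem_pyRange_one] at hi hj
    simp only [Bool.and_eq_true, decide_eq_true_eq, beq_iff_eq, not_or, not_lt] at hbody
    obtain ⟨⟨⟨hpar, hcell⟩, hint⟩, hdir⟩ := hbody
    by_cases h1 : i > x <;> by_cases h2 : i < x <;> by_cases h3 : j > y <;> by_cases h4 : j < y <;>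
      simp only [h1, h2, h3, h4, decide_true, decide_false, Bool.true_and, Bool.false_and,
        Bool.and_true, Bool.and_false, true_and, and_true, false_and, and_false, and_self,
        if_true, if_false, beq_iff_eq] at hdir <;>
      first
      | omega
      | exact absurd hdir (by simp)
      | skip
    · -- i = x+1, j = y+1
      refine ⟨(1, 1), by simp, ?_⟩
      simp only [Bool.and_eq_true, decide_eq_true_eq, beq_iff_eq]
      refine ⟨⟨⟨⟨⟨⟨by omega, by omega⟩, by omega⟩, by omega⟩, ?_⟩, ?_⟩, ?_⟩
      · convert hpar using 2; omega
      · convert hcell using 2 <;> omega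
      · convert hdir using 2 <;> omega
    · -- i = x+1, j = y-1
      refine ⟨(1, -1), by simp, ?_⟩
      simp only [Bool.and_eq_true, decide_eq_true_eq, beq_iff_eq]
      refine ⟨⟨⟨⟨⟨⟨by omega, by omega⟩, by omega⟩, by omega⟩, ?_⟩, ?_⟩, ?_⟩
      · convert hpar using 2; omega
      · convert hcell using 2 <;> omega
      · convert hdir using 2 <;> omega
    · -- i = x-1, j = y+1
      refine ⟨(-1, 1), by simp, ?_⟩
      simp only [Bool.and_eq_true, decide_eq_true_eq, beq_iff_eq]
      refine ⟨⟨⟨⟨⟨⟨by omega, by omega⟩, by omega⟩, by omega⟩, ?_⟩, ?_⟩, ?_⟩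
      · convert hpar using 2; omega
      · convert hcell using 2 <;> omega
      · convert hdir using 2 <;> omega
    · -- i = x-1, j = y-1
      refine ⟨(-1, -1), by simp, ?_⟩
      simp only [Bool.and_eq_true, decide_eq_true_eq, beq_iff_eq]
      refine ⟨⟨⟨⟨⟨⟨by omega, by omega⟩, by omega⟩, by omega⟩, ?_⟩, ?_⟩, ?_⟩
      · convert hpar using 2; omega
      · convert hcell using 2 <;> omega
      · convert hdir using 2 <;> omega
  · rintro ⟨d, hd, hB⟩
    simp only [List.mem_cons, List.not_mem_nil, or_false] at hd
    simp only [Bool.and_eq_true, decide_eq_true_eq, beq_iff_eq] at hB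
    obtain ⟨⟨⟨⟨⟨⟨hi1, hi6⟩, hj1⟩, hj6⟩, hpar⟩, hcell⟩, hland⟩ := hB
    refine ⟨x + d.1, PySem.List.mem_pyRange_one.mpr ⟨?_, ?_⟩,
      List.any_eq_true.mpr ⟨y + d.2, PySem.List.mem_pyRange_one.mpr ⟨?_, ?_⟩, ?_⟩⟩
    · rcases hd with rfl | rfl | rfl | rfl <;> simp_all <;> omega
    · rcases hd with rfl | rfl | rfl | rfl <;> simp_all <;> omega
    · rcases hd with rfl | rfl | rfl | rfl <;> simp_all <;> omega
    · rcases hd with rfl | rfl | rfl | rfl <;> simp_all <;> omega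
    · simp only [Bool.and_eq_true, decide_eq_true_eq, beq_iff_eq, not_or, not_lt]
      refine ⟨⟨⟨hpar, hcell⟩, ?_⟩, ?_⟩
      · rcases hd with rfl | rfl | rfl | rfl <;> simp at hi1 hi6 hj1 hj6 ⊢ <;> omega
      · rcases hd with rfl | rfl | rfl | rfl
        · rw [if_pos (by simp only [Bool.and_eq_true, decide_eq_true_eq]; omega)]
          simpa using hland
        · rw [if_neg (by simp only [Bool.and_eq_true, decide_eq_true_eq]; omega),
              if_pos (by simp only [Bool.and_eq_true, decide_eq_true_eq]; omega)]
          convert (beq_iff_eq).mpr hland using 3 <;> omega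
        · rw [if_neg (by simp only [Bool.and_eq_true, decide_eq_true_eq]; omega),
              if_neg (by simp only [Bool.and_eq_true, decide_eq_true_eq]; omega),
              if_pos (by simp only [Bool.and_eq_true, decide_eq_true_eq]; omega)]
          convert (beq_iff_eq).mpr hland using 3 <;> omega
        · rw [if_neg (by simp only [Bool.and_eq_true, decide_eq_true_eq]; omega),
              if_neg (by simp only [Bool.and_eq_true, decide_eq_true_eq]; omega),
              if_neg (by simp only [Bool.and_eq_true, decide_eq_true_eq]; omega),
              if_pos (by simp only [Bool.and_eq_true, decide_eq_true_eq]; omega)]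
          convert (beq_iff_eq).mpr hland using 3 <;> omega


-- ===== VERDICT (by name: the statement is the Claim_ definition above) =====
theorem is_combo_spec : Claim_equal_is_combo := by
  intro board position name _ _
  unfold Spec_is_combo is_combo is_combo_alt
  by_cases h : position = [none, none]
  · simp [h]
  · simp only [h, if_neg h, if_false]
    exact loops_eq board name _ _
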